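-- pv_equiv track=rewrite | github.com/stoneboat/dpsgd-auditbench | src/whitebox_auditing/tree_mechanism.py | prefix_decomposition
-- ===== SOURCE A (Python) =====
-- from typing import Dict, List, Tuple
--
-- def prefix_decomposition(t: int) -> List[Tuple[int, int]]:
--     """Canonical set of tree nodes covering the prefix [0..t] (inclusive).
--     """
--     if t < 0:
--         return []
--     nodes: List[Tuple[int, int]] = []
--     n = t + 1
--     offset = 0
--     msb = n.bit_length() - 1
--     for level in range(msb, -1, -1):
--         if n & (1 << level):
--             nodes.append((level, offset >> level))
--             offset += 1 << level
--     return nodes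
-- ===== SOURCE B (Python) =====
-- from typing import Dict, List, Tuple
--
-- def prefix_decomposition(t: int) -> List[Tuple[int, int]]:
--     """Canonical set of tree nodes covering the prefix [0..t] (inclusive).
--
--     Low-to-high bit scan: shift n right one bit per step; whenever the
--     current low bit is set the node index is simply n - 1 (no running
--     offset needed), then reverse to get the high-to-low order.
--     """
--     nodes: List[Tuple[int, int]] = []
--     n = t + 1
--     level = 0
--     while n > 0:
--         if n & 1:
--             nodes.append((level, n - 1))
--         n >>= 1
--         level += 1
--     nodes.reverse()
--     return nodes
-- ===== Notes on version B (the rewrite author's own statement) =====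
-- stated objective: simpler
-- what changed: Replaces the high-to-low scan with a running offset accumulator by a low-to-high scan that shifts n itself, so the node index is just n-1 at each step, with a final reverse; no bit_length, no offset bookkeeping.
import Mathlib
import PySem

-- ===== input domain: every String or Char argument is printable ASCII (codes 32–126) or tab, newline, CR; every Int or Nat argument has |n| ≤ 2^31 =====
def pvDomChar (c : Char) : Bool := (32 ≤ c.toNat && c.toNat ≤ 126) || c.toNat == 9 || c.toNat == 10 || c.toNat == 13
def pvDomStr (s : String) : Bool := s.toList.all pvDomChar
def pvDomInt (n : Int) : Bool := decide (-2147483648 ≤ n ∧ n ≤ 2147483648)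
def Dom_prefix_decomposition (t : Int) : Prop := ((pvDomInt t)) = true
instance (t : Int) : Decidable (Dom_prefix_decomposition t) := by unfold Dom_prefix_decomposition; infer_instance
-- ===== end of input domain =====

-- B replaces A's high-to-low scan with a running offset accumulator by a low-to-high
-- scan that shifts n itself (node index = n - 1 at each step) followed by a reverse:
-- simpler, same asymptotic cost.

-- ===== PORT A =====
-- literal port of A: descending level loop over range(msb, -1, -1) with (nodes, offset)
-- state; shifts are by level.toNat (level is nonnegative throughout the range)
def prefix_decomposition (t : Int) : List (Int × Int) :=
  if t < 0 then []
  else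
    let n := t + 1
    let msb : Int := (PySem.Int.bitLength n : Int) - 1
    ((PySem.List.pyRange msb (-1) (-1)).foldl
      (fun (st : List (Int × Int) × Int) level =>
        if PySem.Int.band n (@HShiftLeft.hShiftLeft Int Nat Int Int.instHShiftLeftNat 1 level.toNat) ≠ 0 then
          (st.1 ++ [(level, @HShiftRight.hShiftRight Int Nat Int Int.instHShiftRightNat st.2 level.toNat)],
           st.2 + @HShiftLeft.hShiftLeft Int Nat Int Int.instHShiftLeftNat 1 level.toNat)
        else st)
      ([], 0)).1

-- ===== PORT B =====
-- the while loop of Source B: n is halved each step; the 'while n > 0' guard is ported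
-- via .toNat (t+1 ≤ 0 gives n = 0 and the loop body never runs, exactly as in Python)
def pdAltGo (n : Nat) (level : Int) (nodes : List (Int × Int)) : List (Int × Int) :=
  if n = 0 then nodes
  else
    pdAltGo (n >>> 1) (level + 1)
      (if n &&& 1 = 1 then nodes ++ [(level, (n : Int) - 1)] else nodes)
decreasing_by simpa [Nat.shiftRight_succ] using Nat.div_lt_self (Nat.pos_of_ne_zero (by assumption)) one_lt_two

def prefix_decomposition_alt (t : Int) : List (Int × Int) :=
  (pdAltGo (t + 1).toNat 0 []).reverse

-- ===== PRECONDITION & SPEC =====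
def Spec_prefix_decomposition (t : Int) (out : List (Int × Int)) : Prop := out = prefix_decomposition_alt t
instance (t : Int) (out : List (Int × Int)) : Decidable (Spec_prefix_decomposition t out) := by unfold Spec_prefix_decomposition; infer_instance

-- ===== CLAIM (what is proved, stated in full; the proofs are below) =====
def Claim_equal_prefix_decomposition : Prop := ∀ (t : Int), Dom_prefix_decomposition t → Spec_prefix_decomposition t (prefix_decomposition t)

-- ===== LEMMAS AND PROOFS =====

-- the tree node contributed by bit j of m (none if the bit is clear)
def pdEntry (m : Nat) (j : Nat) : Option (Int × Int) :=
  if (m >>> j) % 2 = 1 then some ((j : Int), ((m >>> j : Nat) : Int) - 1) else none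

theorem pdHalfLt (m : Nat) (h0 : m ≠ 0) : m >>> 1 < m := by
  simpa [Nat.shiftRight_succ] using Nat.div_lt_self (Nat.pos_of_ne_zero h0) one_lt_two

theorem pdAltGo_zero (l : Int) (nodes : List (Int × Int)) : pdAltGo 0 l nodes = nodes := by
  rw [pdAltGo]; simp

-- accumulator lemma for B's loop
theorem pdAltGo_acc (m : Nat) : ∀ (l : Int) (nodes : List (Int × Int)),
    pdAltGo m l nodes = nodes ++ pdAltGo m l [] := by
  induction m using Nat.strong_induction_on with
  | _ m ih =>
    intro l nodes
    by_cases h0 : m = 0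
    · simp [h0, pdAltGo_zero]
    · have hlt := pdHalfLt m h0
      conv_lhs => rw [pdAltGo]
      conv_rhs => rw [pdAltGo]
      simp only [h0, reduceIte]
      by_cases hb : m &&& 1 = 1
      · simp only [hb, reduceIte]
        rw [ih _ hlt (l + 1) (nodes ++ [(l, (m : Int) - 1)]),
            ih _ hlt (l + 1) ([] ++ [(l, (m : Int) - 1)])]
        simp
      · simp only [hb, reduceIte]
        exact ih _ hlt (l + 1) nodes
-- B's loop computes the ascending filterMap of pdEntry over range (bitLength m)
theorem pdAltGo_eq (m : Nat) : ∀ (l : Int),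
    pdAltGo m l [] =
      (List.range (PySem.Int.bitLength (m : Int))).filterMap
        (fun j => (pdEntry m j).map (fun p => (l + p.1, p.2))) := by
  induction m using Nat.strong_induction_on with
  | _ m ih =>
    intro l
    rw [pdAltGo]
    by_cases h0 : m = 0
    · simp [h0, PySem.Int.bitLength_zero]
    · have hpos : 0 < m := Nat.pos_of_ne_zero h0
      have hlt := pdHalfLt m h0
      rw [PySem.Int.bitLength_natCast hpos, List.range_succ_eq_map]
      rw [pdAltGo_acc, ih _ hlt (l+1)]
      have h1 : m >>> 1 = m / 2 := by simp [Nat.shiftRight_succ]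
      have hsh : ∀ j : Nat, m >>> (j + 1) = (m / 2) >>> j := by
        intro j; rw [add_comm, Nat.shiftRight_add, h1]
      have hmap : ∀ j : Nat,
          (pdEntry m (j + 1)).map (fun p => (l + p.1, p.2)) =
          (pdEntry (m / 2) j).map (fun p => ((l + 1) + p.1, p.2)) := by
        intro j
        simp only [pdEntry, hsh j]
        split
        all_goals simp
        all_goals omega
      simp only [h1]
      rw [List.filterMap_cons, List.filterMap_map]
      by_cases hb : m &&& 1 = 1
      · have hmod : m % 2 = 1 := by simpa [Nat.and_one_is_mod] using hb
        have hhead : Option.map (fun p => (l + p.1, p.2)) (pdEntry m 0) = some (l, (m : Int) - 1) := by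
          simp [pdEntry, hmod]
        rw [hhead]
        simp only [hb, reduceIte]
        simp [Nat.succ_eq_add_one, hmap, h0]
      · have hmod : ¬ m % 2 = 1 := by simpa [Nat.and_one_is_mod] using hb
        have hhead : Option.map (fun p => (l + p.1, p.2)) (pdEntry m 0) = none := by
          simp [pdEntry, hmod]
        rw [hhead]
        simp only [hb, reduceIte]
        simp [Nat.succ_eq_add_one, hmap, h0]

-- bit test of A's branch, as a parity statement
theorem band_two_pow_ne (m k : Nat) :
    (PySem.Int.band (m : Int) ((1 : Int) <<< k) ≠ 0) ↔ (m >>> k) % 2 = 1 := by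
  have h1 : ((1 : Int) <<< k) = ((2 ^ k : Nat) : Int) := by
    exact_mod_cast Nat.one_shiftLeft k
  rw [h1, PySem.Int.band_natCast m (2 ^ k)]
  have h3 : (m &&& 2 ^ k ≠ 0) ↔ (m >>> k) % 2 = 1 := by
    simp [Nat.and_two_pow, Nat.testBit]
  exact (Int.natCast_ne_zero).trans h3

-- casts for the shifts appearing in A's loop
theorem natCast_shiftRight' (a k : Nat) : ((a : Nat) : Int) >>> k = ((a >>> k : Nat) : Int) := by
  exact_mod_cast rfl

-- A's loop: fold over the countdown range L..0 from a truncated-offset state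
theorem A_loop (m : Nat) : ∀ (L : Nat) (nodes : List (Int × Int)),
    (PySem.List.pyRange (L : Int) (-1) (-1)).foldl
      (fun (st : List (Int × Int) × Int) level =>
        if PySem.Int.band (m : Int) (@HShiftLeft.hShiftLeft Int Nat Int Int.instHShiftLeftNat 1 level.toNat) ≠ 0 then
          (st.1 ++ [(level, @HShiftRight.hShiftRight Int Nat Int Int.instHShiftRightNat st.2 level.toNat)],
           st.2 + @HShiftLeft.hShiftLeft Int Nat Int Int.instHShiftLeftNat 1 level.toNat)
        else st)
      (nodes, ((m / 2 ^ (L + 1) * 2 ^ (L + 1) : Nat) : Int))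
    = (nodes ++ ((List.range (L + 1)).filterMap (pdEntry m)).reverse, (m : Int)) := by
  intro L
  induction L with
  | zero =>
    intro nodes
    rw [show ((0 : Nat) : Int) = (0 : Int) by norm_num,
        PySem.List.pyRange_neg_one_cons (by norm_num),
        PySem.List.pyRange_neg_one_eq_nil (by norm_num)]
    simp only [List.foldl_cons, List.foldl_nil, Int.toNat_zero]
    have he : (m / 2 ^ (0 + 1) * 2 ^ (0 + 1) : Nat) = m / 2 * 2 := by norm_num
    rw [he]
    by_cases hb : (m >>> 0) % 2 = 1
    · rw [if_pos (by rw [band_two_pow_ne m 0]; exact hb)]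
      have hm2 : m % 2 = 1 := by simpa using hb
      have hsr : (@HShiftRight.hShiftRight Int Nat Int Int.instHShiftRightNat
          ((m / 2 * 2 : Nat) : Int) 0) = ((m / 2 * 2 : Nat) : Int) := by
        rw [show (@HShiftRight.hShiftRight Int Nat Int Int.instHShiftRightNat
            ((m / 2 * 2 : Nat) : Int) 0) = ((m / 2 * 2 : Nat) : Int) >>> (0 : Nat) from rfl,
           natCast_shiftRight']
        norm_num
      rw [hsr]
      have hshl : (@HShiftLeft.hShiftLeft Int Nat Int Int.instHShiftLeftNat 1 0) = (1 : Int) := by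
        decide
      rw [hshl]
      have hval : ((m / 2 * 2 : Nat) : Int) = (m : Int) - 1 := by omega
      have hoff : ((m / 2 * 2 : Nat) : Int) + 1 = (m : Int) := by omega
      rw [hoff, hval]
      simp [pdEntry, hm2]
    · rw [if_neg (by rw [band_two_pow_ne m 0]; exact hb)]
      have hm2 : m % 2 = 0 := by simp at hb; omega
      have hoff : ((m / 2 * 2 : Nat) : Int) = (m : Int) := by omega
      rw [hoff]
      simp [pdEntry, hm2]
  | succ L ih =>
    intro nodes
    rw [PySem.List.pyRange_neg_one_cons (by exact_mod_cast by omega : (-1:Int) < ((L+1 : Nat) : Int))]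
    simp only [List.foldl_cons, Int.toNat_natCast]
    have hrange : (List.range (L + 1 + 1)).filterMap (pdEntry m)
        = (List.range (L + 1)).filterMap (pdEntry m) ++ (pdEntry m (L + 1)).toList := by
      rw [List.range_succ, List.filterMap_append]
      cases h : pdEntry m (L + 1) <;> simp [h]
    have hstep : ((L + 1 : Nat) : Int) - 1 = ((L : Nat) : Int) := by push_cast; ring
    have hshl : (@HShiftLeft.hShiftLeft Int Nat Int Int.instHShiftLeftNat 1 (L + 1))
        = ((2 ^ (L + 1) : Nat) : Int) := by
      show (1 : Int) <<< (L + 1) = _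
      exact_mod_cast Nat.one_shiftLeft (L + 1)
    have hq2 : m / 2 ^ (L + 1) / 2 = m / 2 ^ (L + 2) := by
      rw [Nat.div_div_eq_div_mul]; ring_nf
    have hm := Nat.shiftRight_eq_div_pow m (L + 1)
    by_cases hb : (m >>> (L + 1)) % 2 = 1
    · rw [if_pos (by rw [band_two_pow_ne m (L+1)]; exact hb)]
      have hq : m / 2 ^ (L + 1) = 2 * (m / 2 ^ (L + 2)) + 1 := by omega
      have hv : (@HShiftRight.hShiftRight Int Nat Int Int.instHShiftRightNat
          ((m / 2 ^ (L + 1 + 1) * 2 ^ (L + 1 + 1) : Nat) : Int) (L + 1))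
          = ((m >>> (L + 1) : Nat) : Int) - 1 := by
        rw [show (@HShiftRight.hShiftRight Int Nat Int Int.instHShiftRightNat
            ((m / 2 ^ (L + 1 + 1) * 2 ^ (L + 1 + 1) : Nat) : Int) (L + 1))
            = ((m / 2 ^ (L + 1 + 1) * 2 ^ (L + 1 + 1) : Nat) : Int) >>> (L + 1) from rfl]
        rw [natCast_shiftRight']
        have hgen : ∀ (a b : Nat), 0 < b → a * (b * 2) / b = a * 2 := by
          intro a b hb0
          rw [show a * (b * 2) = a * 2 * b by ring, Nat.mul_div_cancel _ hb0]
        have : (m / 2 ^ (L + 2) * 2 ^ (L + 2)) >>> (L + 1) = m / 2 ^ (L + 2) * 2 := by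
          rw [Nat.shiftRight_eq_div_pow]
          rw [show (2:Nat) ^ (L + 2) = 2 ^ (L + 1) * 2 by ring]
          exact hgen _ _ ((by positivity : 0 < (2:Nat) ^ (L + 1)))
        rw [show L + 1 + 1 = L + 2 from rfl, this]
        omega
      have hoff : ((m / 2 ^ (L + 1 + 1) * 2 ^ (L + 1 + 1) : Nat) : Int)
          + (@HShiftLeft.hShiftLeft Int Nat Int Int.instHShiftLeftNat 1 (L + 1))
          = ((m / 2 ^ (L + 1) * 2 ^ (L + 1) : Nat) : Int) := by
        have hnat : m / 2 ^ (L + 2) * 2 ^ (L + 2) + 2 ^ (L + 1) = m / 2 ^ (L + 1) * 2 ^ (L + 1) := by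
          rw [hq, pow_succ 2 (L + 1)]; ring
        rw [hshl, show L + 1 + 1 = L + 2 from rfl]
        exact_mod_cast hnat
      rw [hv, hoff, hstep, ih]
      rw [hrange]
      simp [pdEntry, hb]
    · rw [if_neg (by rw [band_two_pow_ne m (L+1)]; exact hb)]
      have hq : m / 2 ^ (L + 1) = 2 * (m / 2 ^ (L + 2)) := by omega
      have hoff : (m / 2 ^ (L + 1 + 1) * 2 ^ (L + 1 + 1) : Nat) = (m / 2 ^ (L + 1) * 2 ^ (L + 1) : Nat) := by
        rw [show L + 1 + 1 = L + 2 from rfl, hq]; ring_nf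
      rw [hoff, hstep, ih]
      rw [hrange]
      simp [pdEntry, hb]

-- ===== VERDICT (by name: the statement is the Claim_ definition above) =====
theorem prefix_decomposition_spec : Claim_equal_prefix_decomposition := by
  intro t _
  unfold Spec_prefix_decomposition prefix_decomposition prefix_decomposition_alt
  by_cases ht : t < 0
  · have h0 : (t + 1).toNat = 0 := by omega
    rw [if_pos ht, h0, pdAltGo_zero]
    simp
  · rw [if_neg ht]
    dsimp only
    have hm : t + 1 = (((t + 1).toNat : Nat) : Int) := by omega
    set m := (t + 1).toNat with hmdef
    have hpos : 0 < m := by omega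
    set B := PySem.Int.bitLength (m : Int) with hB
    have hbl : 1 ≤ B := by
      rw [hB, PySem.Int.bitLength_natCast hpos]; omega
    have hmsb : (PySem.Int.bitLength (t + 1) : Int) - 1 = ((B - 1 : Nat) : Int) := by
      rw [hm, ← hB]; omega
    have hlt : m < 2 ^ B := by
      rw [hB]; simpa using PySem.Int.lt_two_pow_bitLength (m : Int)
    have hdiv : m / 2 ^ ((B - 1) + 1) = 0 := by
      rw [Nat.sub_add_cancel hbl]; exact Nat.div_eq_of_lt hlt
    have hA := A_loop m (B - 1) []
    rw [hdiv, Nat.zero_mul, Nat.cast_zero] at hA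
    rw [hmsb, hm, hA]
    rw [pdAltGo_eq m 0]
    rw [Nat.sub_add_cancel hbl]
    simp only [List.nil_append]
    congr 1
    apply List.filterMap_congr
    intro j _
    rcases pdEntry m j with _ | ⟨a, b⟩ <;> simp
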